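-- pv_equiv track=rewrite | github.com/posl/comment_recommendation | script/split_gen/4_time/zh/197_C/3.py | get_min_xor
-- ===== SOURCE A (Python) =====
-- def get_min_xor(n, a):
--     min_xor = 2**30
--     for i in range(n):
--         for j in range(i+1, n+1):
--             xor = a[i]
--             for k in range(i+1, j):
--                 xor = xor ^ a[k]
--             if xor < min_xor:
--                 min_xor = xor
--     return min_xor
-- ===== SOURCE B (Python) =====
-- def get_min_xor(n, a):
--     # prefix-XOR table: xor of a[i..j-1] == prefixes[i] ^ prefixes[j],
--     # so the innermost rescan of A disappears (O(n^2) instead of O(n^3))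
--     prefixes = [0]
--     p = 0
--     for i in range(n):
--         p ^= a[i]
--         prefixes.append(p)
--     min_xor = 2 ** 30
--     for i in range(n):
--         for j in range(i + 1, n + 1):
--             v = prefixes[i] ^ prefixes[j]
--             if v < min_xor:
--                 min_xor = v
--     return min_xor
-- ===== Notes on version B (the rewrite author's own statement) =====
-- stated objective: faster
-- what changed: B precomputes a prefix-XOR table once so the XOR of a[i..j-1] is prefixes[i]^prefixes[j], removing A's innermost rescan loop.
import Mathlib
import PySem

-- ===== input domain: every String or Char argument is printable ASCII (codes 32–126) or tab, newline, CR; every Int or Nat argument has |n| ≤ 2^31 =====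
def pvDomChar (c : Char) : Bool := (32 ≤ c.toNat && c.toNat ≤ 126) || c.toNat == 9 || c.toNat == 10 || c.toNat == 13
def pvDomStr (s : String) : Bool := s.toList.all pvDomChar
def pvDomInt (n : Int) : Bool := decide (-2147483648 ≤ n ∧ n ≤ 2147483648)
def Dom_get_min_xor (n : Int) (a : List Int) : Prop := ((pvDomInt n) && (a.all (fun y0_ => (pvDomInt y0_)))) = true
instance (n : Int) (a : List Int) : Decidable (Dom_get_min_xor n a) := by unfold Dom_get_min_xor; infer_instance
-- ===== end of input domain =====

-- B precomputes a prefix-XOR table once, so A's innermost XOR-rescan loop disappears (objective: faster).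

-- ===== PORT A =====
def get_min_xor (n : Int) (a : List Int) : Int :=
  (PySem.List.pyRange 0 n 1).foldl (fun min_xor i =>
    (PySem.List.pyRange (i+1) (n+1) 1).foldl (fun min_xor j =>
      let xor :=
        (PySem.List.pyRange (i+1) j 1).foldl
          (fun x k => PySem.Int.bxor x (PySem.List.pyGetD a k 0))
          (PySem.List.pyGetD a i 0)
      if xor < min_xor then xor else min_xor) min_xor) (2^30)

-- ===== PORT B =====
def get_min_xor_alt (n : Int) (a : List Int) : Int :=
  -- first loop of Source B: build the prefix-XOR table (state = (p, prefixes))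
  let st :=
    (PySem.List.pyRange 0 n 1).foldl
      (fun (st : Int × List Int) i =>
        let p := PySem.Int.bxor st.1 (PySem.List.pyGetD a i 0)
        (p, st.2 ++ [p]))
      (0, [0])
  let prefixes := st.2
  -- second loop of Source B: min over pairs of prefixes
  (PySem.List.pyRange 0 n 1).foldl (fun min_xor i =>
    (PySem.List.pyRange (i+1) (n+1) 1).foldl (fun min_xor j =>
      let v := PySem.Int.bxor (PySem.List.pyGetD prefixes i 0) (PySem.List.pyGetD prefixes j 0)
      if v < min_xor then v else min_xor) min_xor) (2^30)

-- ===== PRECONDITION & SPEC =====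
-- Pre_ excludes exactly the inputs where Python's A raises IndexError (n larger than len(a)).
def Pre_get_min_xor (n : Int) (a : List Int) : Prop := n ≤ (a.length : Int)
instance (n : Int) (a : List Int) : Decidable (Pre_get_min_xor n a) := by unfold Pre_get_min_xor; infer_instance
def pvWitness_get_min_xor : Int × List Int := (3, [5, -2, 7])

def Spec_get_min_xor (n : Int) (a : List Int) (out : Int) : Prop := out = get_min_xor_alt n a
instance (n : Int) (a : List Int) (out : Int) : Decidable (Spec_get_min_xor n a out) := by unfold Spec_get_min_xor; infer_instance

-- ===== CLAIM (what is proved, stated in full; the proofs are below) =====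
def Claim_equal_get_min_xor : Prop := ∀ (n : Int) (a : List Int), Dom_get_min_xor n a → Pre_get_min_xor n a → Spec_get_min_xor n a (get_min_xor n a)

-- ===== LEMMAS AND PROOFS =====

-- prefix XOR of the first k elements (proof-only helper)
def pvPx (a : List Int) (k : Nat) : Int := (a.take k).foldl PySem.Int.bxor 0

-- bxor on the (sign, magnitude) decomposition: sign = XOR of signs, magnitude index = Nat XOR
theorem pvBxor_ofNat_negSucc (m n : Nat) :
    PySem.Int.bxor (m : Int) (Int.negSucc n) = Int.negSucc (m ^^^ n) := by
  simp [PySem.Int.bxor, Int.negSucc_eq]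
  omega

theorem pvBxor_negSucc_ofNat (m n : Nat) :
    PySem.Int.bxor (Int.negSucc m) (n : Int) = Int.negSucc (m ^^^ n) := by
  simp [PySem.Int.bxor, Int.negSucc_eq]
  omega

theorem pvBxor_negSucc_negSucc (m n : Nat) :
    PySem.Int.bxor (Int.negSucc m) (Int.negSucc n) = ((m ^^^ n : Nat) : Int) := by
  have hm : ¬ (0:Int) ≤ Int.negSucc m := by simp [Int.negSucc_eq]; omega
  have hn : ¬ (0:Int) ≤ Int.negSucc n := by simp [Int.negSucc_eq]; omega
  have hm' : (-(Int.negSucc m) - 1).toNat = m := by simp [Int.negSucc_eq]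
  have hn' : (-(Int.negSucc n) - 1).toNat = n := by simp [Int.negSucc_eq]
  simp only [PySem.Int.bxor, if_neg hm, if_neg hn, hm', hn']

theorem pvBxor_assoc (a b c : Int) :
    PySem.Int.bxor (PySem.Int.bxor a b) c = PySem.Int.bxor a (PySem.Int.bxor b c) := by
  rcases a with m | m <;> rcases b with n | n <;> rcases c with k | k <;>
    simp only [Int.ofNat_eq_natCast, PySem.Int.bxor_natCast, pvBxor_ofNat_negSucc,
      pvBxor_negSucc_ofNat, pvBxor_negSucc_negSucc, Nat.xor_assoc]

theorem pvBxor_cancel (a b : Int) : PySem.Int.bxor a (PySem.Int.bxor a b) = b := by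
  rw [← pvBxor_assoc, PySem.Int.bxor_self, PySem.Int.bxor_comm, PySem.Int.bxor_zero]

theorem pvGetD (a : List Int) (t : Int) (h0 : 0 ≤ t) (h1 : t < (a.length : Int)) :
    PySem.List.pyGetD a t 0 = a.getD t.toNat 0 := by
  rw [PySem.List.pyGetD_eq_getElem _ 0 h0 h1, List.getD_eq_getElem a 0 (by omega)]

theorem pvPx_succ (a : List Int) (k : Nat) (hk : k < a.length) :
    pvPx a (k + 1) = PySem.Int.bxor (pvPx a k) (a.getD k 0) := by
  unfold pvPx
  rw [List.take_add_one, List.getElem?_eq_getElem hk, List.getD_eq_getElem a 0 hk]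
  simp only [Option.toList_some, List.foldl_append, List.foldl_cons, List.foldl_nil]

-- B's first loop builds exactly the prefix-XOR table
theorem pvBuild (a : List Int) (m : Nat) (hm : m ≤ a.length) :
    (PySem.List.pyRange 0 (m : Int) 1).foldl
        (fun (st : Int × List Int) i =>
          let p := PySem.Int.bxor st.1 (PySem.List.pyGetD a i 0)
          (p, st.2 ++ [p]))
        (0, [0])
      = (pvPx a m, (List.range (m + 1)).map (pvPx a)) := by
  induction m with
  | zero => simp [PySem.List.pyRange_one_eq_nil, pvPx]
  | succ m ih =>
    have h1 : ((m + 1 : Nat) : Int) = (m : Int) + 1 := by push_cast; ring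
    rw [h1, PySem.List.pyRange_one_succ_right (by positivity), List.foldl_append,
      ih (by omega)]
    simp only [List.foldl_cons, List.foldl_nil, PySem.List.pyGetD_natCast]
    simp [List.range_succ, pvPx_succ a m (by omega), List.getD_eq_getElem?_getD]

-- A's innermost loop computes the XOR of the segment, i.e. the prefix-XOR difference
theorem pvSegAux (a : List Int) (i : Int) (h0 : 0 ≤ i) :
    ∀ d : Nat, i + 1 + d ≤ (a.length : Int) →
      (PySem.List.pyRange (i+1) (i+1+d) 1).foldl
          (fun x k => PySem.Int.bxor x (PySem.List.pyGetD a k 0)) (PySem.List.pyGetD a i 0)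
        = PySem.Int.bxor (pvPx a i.toNat) (pvPx a (i+1+d).toNat) := by
  intro d
  induction d with
  | zero =>
    intro hd
    rw [Nat.cast_zero, add_zero, PySem.List.pyRange_one_eq_nil (le_refl _), List.foldl_nil]
    have h2 : (i + 1).toNat = i.toNat + 1 := by omega
    rw [h2, pvPx_succ a i.toNat (by omega), pvBxor_cancel,
      pvGetD a i h0 (by omega)]
  | succ d ih =>
    intro hd
    have h1 : ((d + 1 : Nat) : Int) = (d : Int) + 1 := by push_cast; ring
    have h2 : i + 1 + ((d : Int) + 1) = (i + 1 + d) + 1 := by ring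
    rw [h1, h2, PySem.List.pyRange_one_succ_right (by omega), List.foldl_append,
      ih (by omega), List.foldl_cons, List.foldl_nil]
    have h3 : (i + 1 + (d : Int) + 1).toNat = (i + 1 + d).toNat + 1 := by omega
    rw [h3, pvPx_succ a (i + 1 + d).toNat (by omega), ← pvBxor_assoc,
      pvGetD a (i + 1 + d) (by omega) (by omega)]

theorem pvSeg (a : List Int) (i j : Int) (h0 : 0 ≤ i) (hij : i < j) (hj : j ≤ (a.length : Int)) :
    (PySem.List.pyRange (i+1) j 1).foldl
        (fun x k => PySem.Int.bxor x (PySem.List.pyGetD a k 0)) (PySem.List.pyGetD a i 0)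
      = PySem.Int.bxor (pvPx a i.toNat) (pvPx a j.toNat) := by
  obtain ⟨d, rfl⟩ : ∃ d : Nat, j = i + 1 + d := ⟨(j - i - 1).toNat, by omega⟩
  exact pvSegAux a i h0 d hj

theorem pvLookup (a : List Int) (m : Nat) (i : Int) (h0 : 0 ≤ i) (hi : i ≤ (m : Int)) :
    PySem.List.pyGetD ((List.range (m + 1)).map (pvPx a)) i 0 = pvPx a i.toNat := by
  rw [PySem.List.pyGetD_eq_getElem _ 0 h0 (by simp; omega)]
  simp

-- ===== VERDICT (by name: the statement is the Claim_ definition above) =====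
theorem get_min_xor_spec : Claim_equal_get_min_xor := by
  intro n a _ hpre
  unfold Pre_get_min_xor at hpre
  unfold Spec_get_min_xor
  by_cases hn : n ≤ 0
  · simp [get_min_xor, get_min_xor_alt, PySem.List.pyRange_one_eq_nil hn]
  · rw [not_le] at hn
    obtain ⟨m, rfl⟩ : ∃ m : Nat, n = (m : Int) := ⟨n.toNat, by omega⟩
    have hm : m ≤ a.length := by exact_mod_cast hpre
    have hml : (m : Int) ≤ (a.length : Int) := by exact_mod_cast hm
    unfold get_min_xor get_min_xor_alt
    simp only [pvBuild a m hm]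
    apply PySem.List.foldl_congr_mem
    intro acc i hi
    rw [PySem.List.mem_pyRange_one] at hi
    apply PySem.List.foldl_congr_mem
    intro acc' j hj
    rw [PySem.List.mem_pyRange_one] at hj
    rw [pvSeg a i j hi.1 (by omega) (by omega),
      pvLookup a m i hi.1 (by omega), pvLookup a m j (by omega) (by omega)]
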